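-- pv_equiv track=rewrite | github.com/kcharlan/utilities | cognitive_switchyard/cognitive_switchyard/release_notes.py | _extract_operator_action_categories
-- ===== SOURCE A (Python) =====
-- def _extract_operator_action_categories(body: str) -> dict[str, list[str]]:
--     categories = {
--         "Infrastructure": [],
--         "Data Migration": [],
--         "Configuration": [],
--         "Breaking Changes": [],
--         "Rollback Notes": [],
--     }
--     if not body or body.lower().startswith("none"):
--         return categories
--
--     current: str | None = None
--     for line in body.splitlines():
--         if line.startswith("### "):
--             current = line[4:].strip()
--             continue
--         if current in categories and line.strip():
--             categories[current].append(line.rstrip())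
--     return categories
-- ===== SOURCE B (Python) =====
-- def _extract_operator_action_categories(body: str) -> dict[str, list[str]]:
--     categories = {
--         "Infrastructure": [],
--         "Data Migration": [],
--         "Configuration": [],
--         "Breaking Changes": [],
--         "Rollback Notes": [],
--     }
--     if not body or body.lower().startswith("none"):
--         return categories
--
--     # Pass 1: segment the body into ordered (heading, lines) blocks.
--     groups = []
--     cur_heading, cur_lines = None, []
--     for line in body.splitlines():
--         if line.startswith("### "):
--             groups.append((cur_heading, cur_lines))
--             cur_heading, cur_lines = line[4:].strip(), []
--         else:
--             cur_lines.append(line)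
--     groups.append((cur_heading, cur_lines))
--
--     # Pass 2: merge each recognised block into its category (extend, so
--     # repeated headings accumulate).
--     for heading, lines in groups:
--         if heading in categories:
--             categories[heading].extend(
--                 line.rstrip() for line in lines if line.strip()
--             )
--     return categories
-- ===== Notes on version B (the rewrite author's own statement) =====
-- stated objective: alternative
-- what changed: Replaced the single stateful loop (a 'current' cursor appending into the dict line by line) with a two-pass decomposition: first segment the body into ordered (heading, lines) blocks, then merge each recognised block into its category by extending the list.
import Mathlib
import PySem

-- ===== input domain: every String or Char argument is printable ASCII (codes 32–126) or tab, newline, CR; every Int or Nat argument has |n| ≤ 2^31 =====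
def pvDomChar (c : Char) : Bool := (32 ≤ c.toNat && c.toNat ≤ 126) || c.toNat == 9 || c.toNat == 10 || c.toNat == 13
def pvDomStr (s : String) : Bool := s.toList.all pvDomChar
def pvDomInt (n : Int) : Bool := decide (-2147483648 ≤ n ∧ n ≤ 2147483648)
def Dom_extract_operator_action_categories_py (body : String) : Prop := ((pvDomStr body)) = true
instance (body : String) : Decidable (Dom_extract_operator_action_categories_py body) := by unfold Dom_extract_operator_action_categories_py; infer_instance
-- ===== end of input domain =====

-- B replaces A's single stateful loop with a two-pass decomposition (segment into
-- heading blocks, then merge blocks into categories); same cost, alternative structure.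

-- ===== PORT A =====
def pvCats0 : PySem.Dict String (List String) :=
  PySem.Dict.ofList
    [("Infrastructure", []), ("Data Migration", []), ("Configuration", []),
     ("Breaking Changes", []), ("Rollback Notes", [])]

-- A's loop body: state = (current, categories)
def pvAStep (st : Option String × PySem.Dict String (List String)) (line : String) :
    Option String × PySem.Dict String (List String) :=
  if PySem.Str.startswith line "### " then
    (some (PySem.Str.strip (PySem.Str.slice line (some 4) none)), st.2)
  else
    match st.1 with
    | some c =>
        if st.2.contains c && (PySem.Str.strip line != "") then
          (st.1, st.2.modify c [] (· ++ [PySem.Str.rstrip line]))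
        else st
    | none => st

def extract_operator_action_categories_py (body : String) : List (String × List String) :=
  if body == "" || PySem.Str.startswith (PySem.Str.lower body) "none" then pvCats0.items
  else ((PySem.Str.splitlines body).foldl pvAStep (none, pvCats0)).2.items

-- ===== PORT B =====
-- pass 1 loop body: state = (closed groups, current heading, current lines)
def pvBSeg (st : List (Option String × List String) × Option String × List String)
    (line : String) : List (Option String × List String) × Option String × List String :=
  if PySem.Str.startswith line "### " then
    (st.1 ++ [(st.2.1, st.2.2)], some (PySem.Str.strip (PySem.Str.slice line (some 4) none)), [])
  else (st.1, st.2.1, st.2.2 ++ [line])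

-- pass 2 loop body: merge one block into the categories
def pvBStep (d : PySem.Dict String (List String)) (g : Option String × List String) :
    PySem.Dict String (List String) :=
  match g.1 with
  | some h =>
      if d.contains h then
        d.modify h []
          (· ++ (g.2.filter (fun l => PySem.Str.strip l != "")).map PySem.Str.rstrip)
      else d
  | none => d

def extract_operator_action_categories_py_alt (body : String) : List (String × List String) :=
  if body == "" || PySem.Str.startswith (PySem.Str.lower body) "none" then pvCats0.items
  else
    let st := (PySem.Str.splitlines body).foldl pvBSeg ([], none, [])
    let groups := st.1 ++ [(st.2.1, st.2.2)]
    (groups.foldl pvBStep pvCats0).items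

-- ===== PRECONDITION & SPEC =====
def Spec_extract_operator_action_categories_py (body : String) (out : List (String × List String)) : Prop := out = extract_operator_action_categories_py_alt body
instance (body : String) (out : List (String × List String)) : Decidable (Spec_extract_operator_action_categories_py body out) := by unfold Spec_extract_operator_action_categories_py; infer_instance

-- ===== CLAIM (what is proved, stated in full; the proofs are below) =====
def Claim_equal_extract_operator_action_categories_py : Prop := ∀ (body : String), Dom_extract_operator_action_categories_py body → Spec_extract_operator_action_categories_py body (extract_operator_action_categories_py body)

-- ===== LEMMAS AND PROOFS =====

-- segmentation of a list of lines, structurally: (lines before the next heading, remaining groups)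
def pvSegF : List String → List String × List (Option String × List String)
  | [] => ([], [])
  | l :: ls =>
      if PySem.Str.startswith l "### " then
        ([], (some (PySem.Str.strip (PySem.Str.slice l (some 4) none)), (pvSegF ls).1) :: (pvSegF ls).2)
      else (l :: (pvSegF ls).1, (pvSegF ls).2)

theorem pv_modify_modify_self (d : PySem.Dict String (List String)) (k : String)
    (f g : List String → List String) :
    (d.modify k [] g).modify k [] f = d.modify k [] (fun x => f (g x)) := by
  simp [PySem.Dict.modify, PySem.Dict.insert_insert_self]

theorem pv_modify_self_id (d : PySem.Dict String (List String)) (k : String)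
    (h : d.contains k = true) (hn : d.keys.Nodup) :
    d.modify k [] (fun x => x) = d := by
  rw [PySem.Dict.contains_eq_isSome_get?] at h
  obtain ⟨v, hv⟩ := Option.isSome_iff_exists.mp h
  have hgetD : d.getD k [] = v := PySem.Dict.getD_of_get?_eq_some d [] hv
  have hmem : (k, v) ∈ d.items := PySem.Dict.mem_items_of_get?_eq_some d hv
  have hcontains : d.contains k = true := by
    rw [PySem.Dict.contains_eq_isSome_get?, hv]; rfl
  show d.insert k (d.getD k []) = d
  rw [hgetD]
  apply PySem.Dict.ext
  simp only [PySem.Dict.insert, hcontains, if_pos]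
  calc List.map (fun p => if (p.1 == k) = true then (k, v) else p) d.items
      = List.map id d.items := by
        apply List.map_congr_left
        intro p hp
        by_cases hk : (p.1 == k) = true
        · have hpk : p.1 = k := by simpa using hk
          have hv2 : d.get? p.1 = some p.2 := PySem.Dict.get?_of_mem_items d (by
            have : (p.1, p.2) ∈ d.items := by simpa using hp
            exact this) hn
          rw [hpk, hv] at hv2
          have hval : v = p.2 := Option.some_inj.mp hv2
          simp only [hk, if_pos, id_eq]
          obtain ⟨p1, p2⟩ := p
          simp only at hpk hval
          rw [hpk, hval]
        · simp [hk]
    _ = d.items := List.map_id d.items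

-- keys never change while the fold only modifies existing keys
theorem pv_keys_modify_of_contains (d : PySem.Dict String (List String)) (k : String)
    (f : List String → List String) (h : d.contains k = true) :
    (d.modify k [] f).keys = d.keys := by
  rw [PySem.Dict.keys_modify]
  exact PySem.Dict.keys_insert_of_contains d _ h

theorem pv_bstep_nil (d : PySem.Dict String (List String)) (hn : d.keys.Nodup)
    (cur : Option String) : pvBStep d (cur, []) = d := by
  cases cur with
  | none => rfl
  | some h =>
      simp only [pvBStep]
      by_cases hc : d.contains h = true
      · rw [if_pos hc]
        have : (fun x : List String => x ++ (List.filter (fun l => PySem.Str.strip l != "") []).map PySem.Str.rstrip) = fun x => x := by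
          funext x; simp
        rw [this]
        exact pv_modify_self_id d h hc hn
      · rw [if_neg hc]

-- the non-heading absorption: consuming one content line first, then the rest of the
-- block, is the same as consuming the whole block
theorem pv_absorb (d : PySem.Dict String (List String)) (cur : Option String)
    (l : String) (rest : List String) (hl : PySem.Str.startswith l "### " = false) :
    pvBStep d (cur, l :: rest) = pvBStep (pvAStep (cur, d) l).2 (cur, rest) := by
  cases cur with
  | none =>
      simp only [pvAStep, hl, Bool.false_eq_true, if_false]
      rfl
  | some c =>
      simp only [pvAStep, hl, Bool.false_eq_true, if_false]
      by_cases hc : d.contains c = true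
      · by_cases hk : (PySem.Str.strip l != "") = true
        · simp only [pvBStep, hc, Bool.and_true, if_pos, List.filter_cons, hk,
            List.map_cons]
          have hc2 : (d.modify c [] (· ++ [PySem.Str.rstrip l])).contains c = true := by
            rw [PySem.Dict.contains_modify]; simp
          rw [if_pos hc2, pv_modify_modify_self]
          congr 1
          funext x; simp
        · simp only [pvBStep, hk, Bool.and_false]
          have : List.filter (fun l => PySem.Str.strip l != "") (l :: rest)
              = List.filter (fun l => PySem.Str.strip l != "") rest := by
            rw [List.filter_cons]
            simp only [hk]
            simp at hk
            simp
          rw [this]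
          simp [hc]
      · have hand : (d.contains c && (PySem.Str.strip l != "")) = false := by simp [hc]
        rw [hand]
        simp only [Bool.false_eq_true, if_false, pvBStep]
        rw [if_neg (by simp [hc]), if_neg (by simp [hc])]

-- main invariant: A's fold over the lines equals B's fold over the segmented groups
theorem pv_main (ls : List String) : ∀ (cur : Option String)
    (d : PySem.Dict String (List String)), d.keys.Nodup →
    (ls.foldl pvAStep (cur, d)).2
      = (pvSegF ls).2.foldl pvBStep (pvBStep d (cur, (pvSegF ls).1)) := by
  induction ls with
  | nil =>
      intro cur d hn
      simp [pvSegF, pv_bstep_nil d hn cur]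
  | cons l ls ih =>
      intro cur d hn
      by_cases hl : PySem.Str.startswith l "### " = true
      · simp only [pvSegF, hl, if_pos, List.foldl_cons, pvAStep]
        rw [ih _ d hn, pv_bstep_nil d hn cur]
      · have hl' : PySem.Str.startswith l "### " = false := by simpa using hl
        simp only [pvSegF, hl', Bool.false_eq_true, if_false, List.foldl_cons]
        have hstep : pvAStep (cur, d) l = ((pvAStep (cur, d) l).1, (pvAStep (cur, d) l).2) := rfl
        have hcur : (pvAStep (cur, d) l).1 = cur := by
          simp only [pvAStep, hl', Bool.false_eq_true, if_false]
          cases cur with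
          | none => rfl
          | some c => by_cases h : (d.contains c && (PySem.Str.strip l != "")) = true <;> simp [h]
        have hnd2 : (pvAStep (cur, d) l).2.keys.Nodup := by
          have : (pvAStep (cur, d) l).2.keys = d.keys := by
            simp only [pvAStep, hl', Bool.false_eq_true, if_false]
            cases cur with
            | none => rfl
            | some c =>
                by_cases h : (d.contains c && (PySem.Str.strip l != "")) = true
                · simp only [h, if_pos]
                  exact pv_keys_modify_of_contains d c _ (by
                    rcases Bool.and_eq_true_iff.mp h with ⟨h1, _⟩; exact h1)
                · simp [h]
          rw [this]; exact hn
        rw [show ls.foldl pvAStep (pvAStep (cur, d) l)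
              = ls.foldl pvAStep ((pvAStep (cur, d) l).1, (pvAStep (cur, d) l).2) from rfl,
            hcur, ih cur _ hnd2, ← pv_absorb d cur l (pvSegF ls).1 hl']

-- B's first pass produces exactly the segmentation pvSegF
theorem pv_seg (ls : List String) : ∀ (done : List (Option String × List String))
    (cur : Option String) (acc : List String),
    (let st := ls.foldl pvBSeg (done, cur, acc); st.1 ++ [(st.2.1, st.2.2)])
      = done ++ (cur, acc ++ (pvSegF ls).1) :: (pvSegF ls).2 := by
  induction ls with
  | nil => intro done cur acc; simp [pvSegF]
  | cons l ls ih =>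
      intro done cur acc
      by_cases hl : PySem.Str.startswith l "### " = true
      · simp only [List.foldl_cons, pvBSeg, hl, if_pos, pvSegF]
        rw [ih]
        simp
      · have hl' : PySem.Str.startswith l "### " = false := by simpa using hl
        simp only [List.foldl_cons, pvBSeg, hl', Bool.false_eq_true, if_false, pvSegF]
        rw [ih]
        simp

theorem pvCats0_nodup : pvCats0.keys.Nodup := by decide

-- ===== VERDICT (by name: the statement is the Claim_ definition above) =====
theorem extract_operator_action_categories_py_spec : Claim_equal_extract_operator_action_categories_py := by
  intro body _
  unfold Spec_extract_operator_action_categories_py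
  unfold extract_operator_action_categories_py extract_operator_action_categories_py_alt
  by_cases hg : (body == "" || PySem.Str.startswith (PySem.Str.lower body) "none") = true
  · rw [if_pos hg, if_pos hg]
  · rw [if_neg hg, if_neg hg]
    have hseg := pv_seg (PySem.Str.splitlines body) [] none []
    simp only [List.nil_append] at hseg
    show _ = (((((PySem.Str.splitlines body).foldl pvBSeg ([], none, [])).1
        ++ [(((PySem.Str.splitlines body).foldl pvBSeg ([], none, [])).2.1,
             ((PySem.Str.splitlines body).foldl pvBSeg ([], none, [])).2.2)]).foldl
          pvBStep pvCats0)).items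
    rw [hseg]
    simp only [List.foldl_cons]
    rw [pv_main (PySem.Str.splitlines body) none pvCats0 pvCats0_nodup]
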